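-- pv_equiv track=rewrite | github.com/lana2-2karla/restaurant-orders | src/analyze_log.py | days_never_visited
-- ===== SOURCE A (Python) =====
-- def days_never_visited(client_name: str, list_costumers: list):
--
--     set_plates = set()
--     set_plates_costumer = set()
--
--
--     for costumer in list_costumers:
--         set_plates.add(costumer['day'])
--         if costumer['name'] == client_name:
--             set_plates_costumer.add(costumer['day'])
--     return set_plates.difference(set_plates_costumer)
-- ===== SOURCE B (Python) =====
-- def days_never_visited(client_name: str, list_costumers: list):
--     names_by_day = {}
--     for costumer in list_costumers:
--         names_by_day.setdefault(costumer['day'], set()).add(costumer['name'])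
--     return {day for day, names in names_by_day.items() if client_name not in names}
-- ===== Notes on version B (the rewrite author's own statement) =====
-- stated objective: alternative
-- what changed: Instead of maintaining two parallel day-sets and a final set.difference, B builds one dict grouping the names served per day and returns the days whose name-set lacks the client via a membership-test comprehension.
import Mathlib
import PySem

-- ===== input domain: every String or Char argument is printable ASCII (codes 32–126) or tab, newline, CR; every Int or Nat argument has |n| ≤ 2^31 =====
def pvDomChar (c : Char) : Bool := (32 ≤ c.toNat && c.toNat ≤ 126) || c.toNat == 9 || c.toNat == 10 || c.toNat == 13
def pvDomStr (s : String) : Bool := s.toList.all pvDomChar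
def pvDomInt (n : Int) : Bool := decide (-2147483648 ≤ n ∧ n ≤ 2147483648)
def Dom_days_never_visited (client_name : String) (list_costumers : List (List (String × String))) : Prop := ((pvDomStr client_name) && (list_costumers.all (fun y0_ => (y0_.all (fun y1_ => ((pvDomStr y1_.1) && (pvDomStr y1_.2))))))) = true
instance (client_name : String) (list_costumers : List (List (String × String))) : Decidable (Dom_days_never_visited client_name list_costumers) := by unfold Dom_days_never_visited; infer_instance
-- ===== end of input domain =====

-- B groups served names per day in one dict and filters by membership instead of two
-- parallel day-sets plus set.difference; equal value, genuinely different structure.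

-- ===== PORT A =====
def days_never_visited (client_name : String) (list_costumers : List (List (String × String))) : List String :=
  -- set_plates, set_plates_costumer = set(), set(); loop adds costumer['day'] (getD: Pre_ guarantees the key)
  let st := list_costumers.foldl
    (fun (st : PySem.Set String × PySem.Set String) costumer =>
      let day := (PySem.Dict.mk costumer).getD "day" ""
      let sp := PySem.Set.add st.1 day
      let spc := if (PySem.Dict.mk costumer).getD "name" "" == client_name
                 then PySem.Set.add st.2 day else st.2
      (sp, spc))
    (PySem.Set.empty, PySem.Set.empty)
  PySem.Set.diff st.1 st.2

-- ===== PORT B =====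
def days_never_visited_alt (client_name : String) (list_costumers : List (List (String × String))) : List String :=
  -- names_by_day.setdefault(day, set()).add(name)  =  modify day ∅ (·.add name)
  let names_by_day := list_costumers.foldl
    (fun (d : PySem.Dict String (PySem.Set String)) costumer =>
      d.modify ((PySem.Dict.mk costumer).getD "day" "") PySem.Set.empty
        (fun names => PySem.Set.add names ((PySem.Dict.mk costumer).getD "name" "")))
    PySem.Dict.empty
  -- {day for day, names in names_by_day.items() if client_name not in names}
  (names_by_day.items.filter (fun p => !(PySem.Set.contains p.2 client_name))).map (fun p => p.1)

-- ===== PRECONDITION & SPEC =====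
-- Pre_: every costumer record has a 'day' and a 'name' key; otherwise A raises KeyError.
def Pre_days_never_visited (client_name : String) (list_costumers : List (List (String × String))) : Prop :=
  ∀ c ∈ list_costumers, "day" ∈ c.map (fun p => p.1) ∧ "name" ∈ c.map (fun p => p.1)
instance (client_name : String) (list_costumers : List (List (String × String))) : Decidable (Pre_days_never_visited client_name list_costumers) := by unfold Pre_days_never_visited; infer_instance
def pvWitness_days_never_visited : String × (List (List (String × String))) :=
  ("ana", [[("day", "Mon"), ("name", "ana")], [("day", "Tue"), ("name", "bob")]])
def Spec_days_never_visited (client_name : String) (list_costumers : List (List (String × String))) (out : List String) : Prop := out = days_never_visited_alt client_name list_costumers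
instance (client_name : String) (list_costumers : List (List (String × String))) (out : List String) : Decidable (Spec_days_never_visited client_name list_costumers out) := by unfold Spec_days_never_visited; infer_instance

-- ===== CLAIM (what is proved, stated in full; the proofs are below) =====
def Claim_equal_days_never_visited : Prop := ∀ (client_name : String) (list_costumers : List (List (String × String))), Dom_days_never_visited client_name list_costumers → Pre_days_never_visited client_name list_costumers → Spec_days_never_visited client_name list_costumers (days_never_visited client_name list_costumers)

-- ===== LEMMAS AND PROOFS =====

-- One step of A's loop, abbreviated for the lemmas (definitionally the lambda in the port).
def dnvStepA (client_name : String) (st : PySem.Set String × PySem.Set String) (costumer : List (String × String)) : PySem.Set String × PySem.Set String :=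
  let day := (PySem.Dict.mk costumer).getD "day" ""
  let sp := PySem.Set.add st.1 day
  let spc := if (PySem.Dict.mk costumer).getD "name" "" == client_name
             then PySem.Set.add st.2 day else st.2
  (sp, spc)

-- One step of B's grouping loop, abbreviated.
def dnvStepB (d : PySem.Dict String (PySem.Set String)) (costumer : List (String × String)) : PySem.Dict String (PySem.Set String) :=
  d.modify ((PySem.Dict.mk costumer).getD "day" "") PySem.Set.empty
    (fun names => PySem.Set.add names ((PySem.Dict.mk costumer).getD "name" ""))

theorem dnv_step_keys (d : PySem.Dict String (PySem.Set String)) (c : List (String × String)) :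
    (dnvStepB d c).keys = PySem.Set.add d.keys ((PySem.Dict.mk c).getD "day" "") := by
  unfold dnvStepB
  rw [PySem.Dict.keys_modify]
  by_cases hmem : ((PySem.Dict.mk c).getD "day" "") ∈ d.keys
  · rw [PySem.Dict.keys_insert_of_contains d _ ((PySem.Dict.contains_iff_mem_keys _ _).mpr hmem),
      PySem.Set.add_eq_ite, if_pos hmem]
  · rw [PySem.Dict.keys_insert_of_not_contains d _ (by
      simp only [← Bool.not_eq_true, PySem.Dict.contains_iff_mem_keys]; exact hmem),
      PySem.Set.add_eq_ite, if_neg hmem]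

theorem dnv_step_mem (client_name : String) (d : PySem.Dict String (PySem.Set String))
    (sp spc : PySem.Set String) (c : List (String × String))
    (hm : ∀ x, x ∈ spc ↔ PySem.Set.contains (d.getD x PySem.Set.empty) client_name = true) :
    ∀ x, x ∈ (dnvStepA client_name (sp, spc) c).2 ↔
      PySem.Set.contains ((dnvStepB d c).getD x PySem.Set.empty) client_name = true := by
  intro x
  have hmx : x ∈ spc ↔ client_name ∈ d.getD x PySem.Set.empty := by
    rw [hm x, PySem.Set.contains_iff]
  unfold dnvStepA dnvStepB
  simp only []
  rw [PySem.Dict.getD_modify]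
  by_cases hx : x = (PySem.Dict.mk c).getD "day" ""
  · subst hx
    rw [if_pos rfl]
    by_cases hn : ((PySem.Dict.mk c).getD "name" "" == client_name) = true
    · rw [if_pos hn]
      have hcn : client_name = (PySem.Dict.mk c).getD "name" "" := (eq_of_beq hn).symm
      simp [PySem.Set.mem_add, hcn]
    · rw [if_neg hn]
      have hne : client_name ≠ (PySem.Dict.mk c).getD "name" "" := fun h => hn (by simp [h])
      simp only [PySem.Set.contains_iff, PySem.Set.mem_add]
      tauto
  · rw [if_neg hx]
    by_cases hn : ((PySem.Dict.mk c).getD "name" "" == client_name) = true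
    · rw [if_pos hn]
      simp only [PySem.Set.contains_iff, PySem.Set.mem_add]
      tauto
    · rw [if_neg hn]
      simpa [PySem.Set.contains_iff] using hmx

-- Invariant of the two loops: the dict's key list IS A's set_plates (same order), its keys
-- stay Nodup, and membership in set_plates_costumer equals membership of client_name in the
-- day's grouped name-set.
theorem dnv_loop_inv (client_name : String) (lcs : List (List (String × String)))
    (sp spc : PySem.Set String) (d : PySem.Dict String (PySem.Set String))
    (hk : d.keys = sp) (hnd : d.keys.Nodup)
    (hm : ∀ x, x ∈ spc ↔ PySem.Set.contains (d.getD x PySem.Set.empty) client_name = true) :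
    (lcs.foldl dnvStepB d).keys = (lcs.foldl (dnvStepA client_name) (sp, spc)).1 ∧
    (lcs.foldl dnvStepB d).keys.Nodup ∧
    (∀ x, x ∈ (lcs.foldl (dnvStepA client_name) (sp, spc)).2 ↔
      PySem.Set.contains ((lcs.foldl dnvStepB d).getD x PySem.Set.empty) client_name = true) := by
  induction lcs generalizing sp spc d with
  | nil => exact ⟨hk, hnd, hm⟩
  | cons c rest ih =>
    simp only [List.foldl_cons]
    have hstep : dnvStepA client_name (sp, spc) c =
        ((dnvStepA client_name (sp, spc) c).1, (dnvStepA client_name (sp, spc) c).2) := rfl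
    rw [hstep]
    apply ih
    · rw [dnv_step_keys, hk]; rfl
    · rw [dnv_step_keys, PySem.Set.add_eq_ite]
      by_cases hmem : ((PySem.Dict.mk c).getD "day" "") ∈ d.keys
      · rw [if_pos hmem]; exact hnd
      · rw [if_neg hmem]
        simpa using List.Nodup.append hnd (List.nodup_singleton _) (by
          intro a ha hb; simp at hb; subst hb; exact hmem ha)
    · exact dnv_step_mem client_name d sp spc c hm

-- ===== VERDICT (by name: the statement is the Claim_ definition above) =====
theorem days_never_visited_spec : Claim_equal_days_never_visited := by
  intro client_name lcs _ _
  unfold Spec_days_never_visited days_never_visited days_never_visited_alt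
  show PySem.Set.diff (lcs.foldl (dnvStepA client_name) (PySem.Set.empty, PySem.Set.empty)).1
        (lcs.foldl (dnvStepA client_name) (PySem.Set.empty, PySem.Set.empty)).2 =
      ((lcs.foldl dnvStepB PySem.Dict.empty).items.filter
        (fun p => !(PySem.Set.contains p.2 client_name))).map (fun p => p.1)
  obtain ⟨hk, hnd, hm⟩ := dnv_loop_inv client_name lcs PySem.Set.empty PySem.Set.empty
    PySem.Dict.empty rfl PySem.Dict.nodup_keys_empty (by
      intro x
      simp [PySem.Dict.getD_empty, PySem.Set.empty])
  rw [PySem.Dict.items_eq_map_keys _ hnd PySem.Set.empty, List.filter_map, List.map_map]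
  simp only [Function.comp_def]
  rw [List.map_id', hk]
  unfold PySem.Set.diff
  apply List.filter_congr
  intro x hx
  congr 1
  rw [Bool.eq_iff_iff]
  simpa [PySem.Set.contains_iff] using hm x
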